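-- pv_equiv track=rewrite | github.com/JakubBrzezo/introligo | introligo/utils.py | process_rst_directives
-- ===== SOURCE A (Python) =====
-- def process_rst_directives(
--     content: str, has_plantuml: bool = True, has_mermaid: bool = True
-- ) -> str:
--     """Process RST content and convert unsupported directives to code blocks.
--
--     This function scans RST content for uml and mermaid directives and converts
--     them to code blocks when the corresponding extensions are not available.
--
--     Args:
--         content: The RST content to process.
--         has_plantuml: Whether sphinxcontrib-plantuml extension is available.
--         has_mermaid: Whether sphinxcontrib-mermaid extension is available.
--
--     Returns:
--         Processed RST content with converted directives.
--     """
--     if has_plantuml and has_mermaid: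
--         # No need to process if all extensions are available
--         return content
--
--     lines = content.split("\n")
--     processed_lines = []
--     i = 0
--
--     while i < len(lines):
--         line = lines[i]
--         stripped = line.strip()
--
--         # Check for uml directive
--         if not has_plantuml and stripped == ".. uml::":
--             # Replace with code-block directive
--             indent = len(line) - len(line.lstrip())
--             processed_lines.append(" " * indent + ".. code-block:: plantuml")
--             i += 1
--             continue
--
--         # Check for mermaid directive
--         if not has_mermaid and stripped == ".. mermaid::":
--             # Replace with code-block directive
--             indent = len(line) - len(line.lstrip())
--             processed_lines.append(" " * indent + ".. code-block:: mermaid")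
--             i += 1
--             continue
--
--         processed_lines.append(line)
--         i += 1
--
--     return "\n".join(processed_lines)
-- ===== SOURCE B (Python) =====
-- def process_rst_directives(
--     content: str, has_plantuml: bool = True, has_mermaid: bool = True
-- ) -> str:
--     """Convert unsupported uml/mermaid directives to code blocks.
--
--     Single left-to-right scan over the raw string: lines are located in
--     place and directive lines are matched by prefix + trailing-whitespace
--     check, driven by a data list of (directive, replacement) targets.
--     """
--     if has_plantuml and has_mermaid:
--         return content
--
--     targets = []
--     if not has_plantuml:
--         targets.append((".. uml::", ".. code-block:: plantuml"))
--     if not has_mermaid: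
--         targets.append((".. mermaid::", ".. code-block:: mermaid"))
--
--     WS = " \t\r\x0b\x0c"
--     out = []
--     i, n = 0, len(content)
--     while True:
--         # locate the end of the current line
--         end = i
--         while end < n and content[end] != "\n":
--             end += 1
--         line = content[i:end]
--         # skip the leading whitespace of the line
--         body = line.lstrip(WS)
--         repl = None
--         for directive, replacement in targets:
--             if body.startswith(directive) and all(
--                 c in WS for c in body[len(directive):]
--             ):
--                 repl = " " * (len(line) - len(body)) + replacement
--                 break
--         out.append(line if repl is None else repl)
--         if end == n:
--             break
--         out.append("\n")
--         i = end + 1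
--     return "".join(out)
-- ===== Notes on version B (the rewrite author's own statement) =====
-- stated objective: alternative
-- what changed: A splits the content into a line list, strips each line and compares it whole against each directive, then joins; B makes a single in-place scan over the raw string, locating line ends directly and matching directives via a data-driven (directive, replacement) target list with a prefix + trailing-whitespace test.
import Mathlib
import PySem

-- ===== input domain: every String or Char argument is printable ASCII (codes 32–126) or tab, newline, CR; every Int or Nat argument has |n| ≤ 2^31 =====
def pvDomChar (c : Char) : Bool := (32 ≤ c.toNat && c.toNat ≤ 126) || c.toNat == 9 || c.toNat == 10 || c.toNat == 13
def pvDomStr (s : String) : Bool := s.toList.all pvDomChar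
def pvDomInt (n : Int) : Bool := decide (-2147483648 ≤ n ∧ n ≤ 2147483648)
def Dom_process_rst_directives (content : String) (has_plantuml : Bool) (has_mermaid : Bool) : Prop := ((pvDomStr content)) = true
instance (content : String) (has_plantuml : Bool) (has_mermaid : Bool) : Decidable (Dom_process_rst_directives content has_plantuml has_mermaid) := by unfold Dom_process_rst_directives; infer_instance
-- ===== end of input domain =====

-- B replaces A's split("\n")/strip/join line-list pipeline by a single in-place scan over the raw
-- string with a data-driven (directive, replacement) target list; alternative decomposition, no speed claim.

-- ===== PORT A =====
-- A's while-loop body: strip the line, compare against each directive in order, append to the accumulator.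
def pvAStep (has_plantuml has_mermaid : Bool) (acc : List (List Char)) (line : List Char) : List (List Char) :=
  let stripped := PySem.Chars.strip line
  if !has_plantuml && stripped == ".. uml::".toList then
    let indent := line.length - (PySem.Chars.lstrip line).length
    acc ++ [List.replicate indent ' ' ++ ".. code-block:: plantuml".toList]
  else if !has_mermaid && stripped == ".. mermaid::".toList then
    let indent := line.length - (PySem.Chars.lstrip line).length
    acc ++ [List.replicate indent ' ' ++ ".. code-block:: mermaid".toList]
  else
    acc ++ [line]

def process_rst_directives (content : String) (has_plantuml : Bool) (has_mermaid : Bool) : String :=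
  if has_plantuml && has_mermaid then content
  else
    let lines := PySem.Chars.splitOn content.toList ['\n']
    let processed := lines.foldl (pvAStep has_plantuml has_mermaid) []
    String.ofList (PySem.Chars.join ['\n'] processed)

-- ===== PORT B =====
-- Source B's WS = " \t\r\x0b\x0c": the membership test `c in WS`.
def pvIsWsB (c : Char) : Bool := c == ' ' || c == '\t' || c == '\r' || c == '\x0b' || c == '\x0c'

-- Source B's `targets` list, built by the two conditional appends.
def pvTargets (has_plantuml has_mermaid : Bool) : List (List Char × List Char) :=
  (if !has_plantuml then [(".. uml::".toList, ".. code-block:: plantuml".toList)] else []) ++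
  (if !has_mermaid then [(".. mermaid::".toList, ".. code-block:: mermaid".toList)] else [])

-- Source B's `for directive, replacement in targets` loop: prefix test + trailing-whitespace test, first hit wins.
def pvBTry : List (List Char × List Char) → List Char → Option (List Char)
  | [], _ => none
  | (dir, repl) :: ts, body =>
    if dir.isPrefixOf body && (body.drop dir.length).all pvIsWsB then some repl
    else pvBTry ts body

-- one line of Source B's scan: body = line.lstrip(WS); on a match re-indent with len(line)-len(body) spaces.
def pvBProcLine (targets : List (List Char × List Char)) (line : List Char) : List Char :=
  let body := line.dropWhile pvIsWsB
  match pvBTry targets body with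
  | some repl => List.replicate (line.length - body.length) ' ' ++ repl
  | none => line

-- Source B's outer `while True` scan: chars up to the next '\n' form the line ("while end < n and
-- content[end] != '\n'" is the takeWhile/dropWhile pair); "if end == n: break" is the isEmpty test;
-- otherwise emit '\n' and continue after it.
def pvBLoop (targets : List (List Char × List Char)) (s : List Char) : List Char :=
  if (s.dropWhile (· != '\n')).isEmpty then pvBProcLine targets (s.takeWhile (· != '\n'))
  else pvBProcLine targets (s.takeWhile (· != '\n')) ++
    '\n' :: pvBLoop targets (s.dropWhile (· != '\n')).tail
termination_by s.length
decreasing_by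
  rename_i h
  have h1 := List.length_dropWhile_le (fun c => c != '\n') s
  have h2 : (s.dropWhile (· != '\n')) ≠ [] := by simpa [List.isEmpty_iff] using h
  have h3 := List.length_pos_of_ne_nil h2
  simp only [List.length_tail]
  omega

def process_rst_directives_alt (content : String) (has_plantuml : Bool) (has_mermaid : Bool) : String :=
  if has_plantuml && has_mermaid then content
  else String.ofList (pvBLoop (pvTargets has_plantuml has_mermaid) content.toList)

-- ===== PRECONDITION & SPEC =====
def Spec_process_rst_directives (content : String) (has_plantuml : Bool) (has_mermaid : Bool) (out : String) : Prop := out = process_rst_directives_alt content has_plantuml has_mermaid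
instance (content : String) (has_plantuml : Bool) (has_mermaid : Bool) (out : String) : Decidable (Spec_process_rst_directives content has_plantuml has_mermaid out) := by unfold Spec_process_rst_directives; infer_instance

-- ===== CLAIM (what is proved, stated in full; the proofs are below) =====
def Claim_equal_process_rst_directives : Prop := ∀ (content : String) (has_plantuml : Bool) (has_mermaid : Bool), Dom_process_rst_directives content has_plantuml has_mermaid → Spec_process_rst_directives content has_plantuml has_mermaid (process_rst_directives content has_plantuml has_mermaid)

-- ===== LEMMAS AND PROOFS =====

-- proof-side split of a char list at '\n', mirroring pvBLoop's line structure
def pvSplitNL (s : List Char) : List (List Char) :=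
  if (s.dropWhile (· != '\n')).isEmpty then [s.takeWhile (· != '\n')]
  else s.takeWhile (· != '\n') :: pvSplitNL (s.dropWhile (· != '\n')).tail
termination_by s.length
decreasing_by
  rename_i h
  have h1 := List.length_dropWhile_le (fun c => c != '\n') s
  have h2 : (s.dropWhile (· != '\n')) ≠ [] := by simpa [List.isEmpty_iff] using h
  have h3 := List.length_pos_of_ne_nil h2
  simp only [List.length_tail]
  omega

lemma pvSplitNL_ne_nil (s : List Char) : pvSplitNL s ≠ [] := by
  rw [pvSplitNL]; split <;> simp

lemma pvSplitNL_cons_nl (rest : List Char) : pvSplitNL ('\n' :: rest) = [] :: pvSplitNL rest := by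
  rw [pvSplitNL]
  simp [List.takeWhile_cons]

lemma pvSplitNL_cons_ne (c : Char) (hc : c ≠ '\n') (rest : List Char) :
    pvSplitNL (c :: rest) = List.modifyHead (c :: ·) (pvSplitNL rest) := by
  conv_lhs => rw [pvSplitNL]
  conv_rhs => rw [pvSplitNL]
  simp only [List.dropWhile_cons, List.takeWhile_cons,
    show ((c : Char) != '\n') = true from by simp [hc], if_true]
  split <;> simp

lemma pv_split_go_spec (fuel : Nat) (l cur : List Char) (acc : List (List Char))
    (h : l.length ≤ fuel) :
    PySem.Chars.splitOn.go ['\n'] fuel l cur acc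
      = acc.reverse ++ List.modifyHead (cur.reverse ++ ·) (pvSplitNL l) := by
  induction fuel generalizing l cur acc with
  | zero =>
    have : l = [] := List.eq_nil_of_length_eq_zero (Nat.le_zero.mp h)
    subst this
    rw [PySem.Chars.splitOn.go.eq_def, pvSplitNL]
    simp
  | succ n ih =>
    match l with
    | [] =>
      rw [PySem.Chars.splitOn.go.eq_def, pvSplitNL]
      simp
    | c :: rest =>
      rw [PySem.Chars.splitOn.go.eq_def]
      simp only []
      by_cases hc : c = '\n'
      · subst hc
        rw [if_pos (by simp [List.isPrefixOf])]
        rw [ih _ _ _ (by simp at h ⊢; omega), pvSplitNL_cons_nl]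
        rcases h2 : pvSplitNL rest with _ | ⟨a, r⟩
        · exact absurd h2 (pvSplitNL_ne_nil rest)
        · simp [h2]
      · rw [if_neg (by simp [List.isPrefixOf]; intro hcc; exact absurd hcc.symm hc)]
        rw [ih _ _ _ (by simp at h ⊢; omega), pvSplitNL_cons_ne c hc]
        rcases h2 : pvSplitNL rest with _ | ⟨a, r⟩
        · exact absurd h2 (pvSplitNL_ne_nil rest)
        · simp [h2]

lemma pv_splitOn_eq (s : List Char) : PySem.Chars.splitOn s ['\n'] = pvSplitNL s := by
  rw [PySem.Chars.splitOn, pv_split_go_spec _ _ _ _ (by omega)]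
  rcases h : pvSplitNL s with _ | ⟨a, r⟩
  · exact absurd h (pvSplitNL_ne_nil s)
  · simp

lemma pv_chr_eq_iff (c d : Char) : c = d ↔ c.toNat = d.toNat := by
  constructor
  · rintro rfl; rfl
  · intro h; have := Char.ofNat_toNat c; rw [h] at this; rw [← this, Char.ofNat_toNat]

lemma pv_ws_imp_isspace (c : Char) (h : pvIsWsB c = true) : PySem.Chars.isspace c = true := by
  simp only [pvIsWsB, Bool.or_eq_true, beq_iff_eq] at h
  simp only [PySem.Chars.isspace]
  rcases h with ((((h|h)|h)|h)|h) <;> subst h <;> decide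

lemma pv_ws_eq_on_dom (c : Char) (h1 : pvDomChar c = true) (h2 : c ≠ '\n') :
    PySem.Chars.isspace c = pvIsWsB c := by
  simp only [pvDomChar, Bool.or_eq_true, Bool.and_eq_true, decide_eq_true_eq, beq_iff_eq] at h1
  have h10 : c.toNat ≠ 10 := fun h => h2 ((pv_chr_eq_iff c '\n').mpr h)
  rw [Bool.eq_iff_iff]
  simp only [PySem.Chars.isspace, pvIsWsB, Bool.or_eq_true, Bool.and_eq_true,
    decide_eq_true_eq, beq_iff_eq, pv_chr_eq_iff]
  simp only [show ' '.toNat = 32 from rfl, show '\t'.toNat = 9 from rfl,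
    show '\x0d'.toNat = 13 from rfl, show '\x0b'.toNat = 11 from rfl,
    show '\x0c'.toNat = 12 from rfl]
  omega

lemma pv_lstrip_eq (line : List Char) (hd : line.all pvDomChar = true) (hn : '\n' ∉ line) :
    PySem.Chars.lstrip line = line.dropWhile pvIsWsB := by
  simp only [PySem.Chars.lstrip]
  induction line with
  | nil => rfl
  | cons a t ih =>
    simp only [List.all_cons, Bool.and_eq_true] at hd
    have hna : a ≠ '\n' := by intro h; exact hn (h ▸ List.mem_cons_self)
    have := pv_ws_eq_on_dom a hd.1 hna
    simp only [List.dropWhile_cons, this]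
    split <;> [exact ih hd.2 (fun h => hn (List.mem_cons_of_mem _ h)); rfl]

lemma pv_strip_eq_iff (line d : List Char)
    (hd : line.all pvDomChar = true) (hn : '\n' ∉ line)
    (hdnil : d ≠ []) (hdlast : PySem.Chars.isspace (d.getLast hdnil) = false) :
    PySem.Chars.strip line = d ↔
      (d <+: line.dropWhile pvIsWsB ∧
        ((line.dropWhile pvIsWsB).drop d.length).all pvIsWsB = true) := by
  set j := line.dropWhile pvIsWsB with hj
  have hjsub : ∀ x ∈ j, x ∈ line := fun x hx => (List.dropWhile_sublist _).subset hx
  have hjws : ∀ x ∈ j, PySem.Chars.isspace x = pvIsWsB x := fun x hx =>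
    pv_ws_eq_on_dom x (by have := List.all_eq_true.mp hd x (hjsub x hx); exact this)
      (fun h => hn (h ▸ hjsub x hx))
  have hstrip : PySem.Chars.strip line = PySem.Chars.rstrip j := by
    rw [PySem.Chars.strip, pv_lstrip_eq line hd hn]
  constructor
  · intro h
    rw [hstrip] at h
    have hdec : j = PySem.Chars.rstrip j ++ (j.reverse.takeWhile PySem.Chars.isspace).reverse := by
      simp only [PySem.Chars.rstrip]
      conv_lhs => rw [← j.reverse_reverse,
        ← List.takeWhile_append_dropWhile (p := PySem.Chars.isspace) (l := j.reverse)]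
      rw [List.reverse_append]
    rw [h] at hdec
    constructor
    · exact hdec ▸ List.prefix_append _ _
    · rw [hdec, List.drop_left]
      rw [List.all_eq_true]
      intro x hx
      have hxt : x ∈ j.reverse.takeWhile PySem.Chars.isspace := List.mem_reverse.mp hx
      have hxj : x ∈ j := List.mem_reverse.mp ((List.takeWhile_sublist _).subset hxt)
      have := List.mem_takeWhile_imp hxt
      rw [hjws x hxj] at this
      exact this
  · rintro ⟨⟨w, hw⟩, hall⟩
    rw [← hw, List.drop_left] at hall
    rw [hstrip, ← hw]
    have hwws : ∀ x ∈ w, PySem.Chars.isspace x = true := fun x hx =>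
      pv_ws_imp_isspace x (List.all_eq_true.mp hall x hx)
    simp only [PySem.Chars.rstrip, List.reverse_append]
    rw [List.dropWhile_append]
    have hwrev : w.reverse.dropWhile PySem.Chars.isspace = [] :=
      List.dropWhile_eq_nil_iff.mpr (fun x hx => hwws x (List.mem_reverse.mp hx))
    rw [hwrev]
    simp only [List.isEmpty_nil, if_true]
    have hdrev : d.reverse = d.getLast hdnil :: d.dropLast.reverse := by
      conv_lhs => rw [← List.dropLast_append_getLast hdnil]
      simp
    rw [hdrev, List.dropWhile_cons_of_neg (by simp [hdlast]), ← hdrev, List.reverse_reverse]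

-- A's per-line value, factored out of pvAStep
def pvALine (has_plantuml has_mermaid : Bool) (line : List Char) : List Char :=
  let stripped := PySem.Chars.strip line
  if !has_plantuml && stripped == ".. uml::".toList then
    List.replicate (line.length - (PySem.Chars.lstrip line).length) ' ' ++ ".. code-block:: plantuml".toList
  else if !has_mermaid && stripped == ".. mermaid::".toList then
    List.replicate (line.length - (PySem.Chars.lstrip line).length) ' ' ++ ".. code-block:: mermaid".toList
  else line

lemma pvAStep_eq (hp hm : Bool) (acc : List (List Char)) (line : List Char) :
    pvAStep hp hm acc line = acc ++ [pvALine hp hm line] := by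
  simp only [pvAStep, pvALine]; split_ifs <;> rfl

lemma pv_line_eq (hp hm : Bool) (line : List Char)
    (hd : line.all pvDomChar = true) (hn : '\n' ∉ line) :
    pvALine hp hm line = pvBProcLine (pvTargets hp hm) line := by
  have hcu : (".. uml::".toList.isPrefixOf (line.dropWhile pvIsWsB)
        && ((line.dropWhile pvIsWsB).drop ".. uml::".toList.length).all pvIsWsB) = true
      ↔ PySem.Chars.strip line = ".. uml::".toList := by
    rw [Bool.and_eq_true, List.isPrefixOf_iff_prefix,
      pv_strip_eq_iff line _ hd hn (by decide) (by decide)]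
  have hcm : (".. mermaid::".toList.isPrefixOf (line.dropWhile pvIsWsB)
        && ((line.dropWhile pvIsWsB).drop ".. mermaid::".toList.length).all pvIsWsB) = true
      ↔ PySem.Chars.strip line = ".. mermaid::".toList := by
    rw [Bool.and_eq_true, List.isPrefixOf_iff_prefix,
      pv_strip_eq_iff line _ hd hn (by decide) (by decide)]
  have hind := pv_lstrip_eq line hd hn
  cases hp <;> cases hm <;>
    simp only [pvALine, pvTargets, pvBProcLine, pvBTry, Bool.not_true, Bool.not_false,
      Bool.true_and, Bool.false_and, Bool.false_eq_true, if_true, if_false, List.append_nil,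
      List.nil_append, List.singleton_append, hind]
  · -- hp = false, hm = false : targets [uml, mermaid]
    by_cases hsu : PySem.Chars.strip line = ".. uml::".toList
    · rw [if_pos (hcu.mpr hsu), if_pos ((beq_iff_eq).mpr hsu)]
    · rw [if_neg (fun hh => hsu (hcu.mp hh)), if_neg (by simpa using hsu)]
      by_cases hsm : PySem.Chars.strip line = ".. mermaid::".toList
      · rw [if_pos (hcm.mpr hsm), if_pos ((beq_iff_eq).mpr hsm)]
      · rw [if_neg (fun hh => hsm (hcm.mp hh)), if_neg (by simpa using hsm)]
  · -- hp = false, hm = true : targets [uml]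
    by_cases hsu : PySem.Chars.strip line = ".. uml::".toList
    · rw [if_pos (hcu.mpr hsu), if_pos ((beq_iff_eq).mpr hsu)]
    · rw [if_neg (fun hh => hsu (hcu.mp hh)), if_neg (by simpa using hsu)]
  · -- hp = true, hm = false : targets [mermaid]
    by_cases hsm : PySem.Chars.strip line = ".. mermaid::".toList
    · rw [if_pos (hcm.mpr hsm), if_pos ((beq_iff_eq).mpr hsm)]
    · rw [if_neg (fun hh => hsm (hcm.mp hh)), if_neg (by simpa using hsm)]

lemma pv_main_list (hp hm : Bool) (s : List Char) (hd : s.all pvDomChar = true) :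
    PySem.Chars.join ['\n'] ((pvSplitNL s).map (pvALine hp hm))
      = pvBLoop (pvTargets hp hm) s := by
  induction hn : s.length using Nat.strong_induction_on generalizing s with
  | _ n ih =>
  subst hn
  rw [pvSplitNL, pvBLoop]
  have hline_dom : (s.takeWhile (· != '\n')).all pvDomChar = true := by
    rw [List.all_eq_true] at hd ⊢
    exact fun x hx => hd x ((List.takeWhile_sublist _).subset hx)
  have hline_nn : '\n' ∉ s.takeWhile (· != '\n') := by
    intro hx
    have := List.mem_takeWhile_imp hx
    simp at this
  by_cases he : (s.dropWhile (· != '\n')).isEmpty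
  · rw [if_pos he, if_pos he, List.map_cons, List.map_nil, PySem.Chars.join_singleton]
    exact pv_line_eq hp hm _ hline_dom hline_nn
  · rw [if_neg he, if_neg he, List.map_cons]
    have h2 : (s.dropWhile (· != '\n')) ≠ [] := by simpa [List.isEmpty_iff] using he
    have h3 := List.length_pos_of_ne_nil h2
    have h1 := List.length_dropWhile_le (fun c => c != '\n') s
    have htl : ((s.dropWhile (· != '\n')).tail).length < s.length := by
      simp only [List.length_tail]; omega
    have htd : ((s.dropWhile (· != '\n')).tail).all pvDomChar = true := by
      rw [List.all_eq_true] at hd ⊢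
      exact fun x hx => hd x ((List.dropWhile_sublist _).subset (List.tail_sublist _ |>.subset hx))
    have hih := ih _ htl _ htd rfl
    rcases hsp : pvSplitNL ((s.dropWhile (· != '\n')).tail) with _ | ⟨a, r⟩
    · exact absurd hsp (pvSplitNL_ne_nil _)
    · rw [hsp] at hih
      rw [List.map_cons, PySem.Chars.join_cons_cons, ← List.map_cons, hih]
      simp [pv_line_eq hp hm _ hline_dom hline_nn]

-- ===== VERDICT (by name: the statement is the Claim_ definition above) =====
theorem process_rst_directives_spec : Claim_equal_process_rst_directives := by
  intro content hp hm hdom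
  unfold Spec_process_rst_directives process_rst_directives process_rst_directives_alt
  by_cases h : (hp && hm) = true
  · simp [h]
  · simp only [h, Bool.false_eq_true, not_false_eq_true, if_neg]
    have hfold : ∀ (lines : List (List Char)) (acc : List (List Char)),
        lines.foldl (pvAStep hp hm) acc = acc ++ lines.map (pvALine hp hm) := by
      intro lines
      induction lines with
      | nil => simp
      | cons a t ih => intro acc; simp [List.foldl_cons, pvAStep_eq, ih]
    rw [pv_splitOn_eq, hfold, List.nil_append, pv_main_list hp hm _ hdom]
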